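-- pv_equiv track=rewrite | github.com/mohammed-elhabib/image_encrpy | main2.py | block_to_decimal
-- ===== SOURCE A (Python) =====
-- def block_to_decimal(block_decimal: [], len_m1, size):
--     binaries = []
--     for pixel in block_decimal:
--         binary = bin(pixel)[2:]
--         div = size - len(binary)
--         if div > 0:
--             binary = '0' * div + binary
--         binaries.append([int(binary[0:len_m1], 2), int(binary[len_m1:], 2)])
--     return binaries
-- ===== SOURCE B (Python) =====
-- def block_to_decimal(block_decimal: [], len_m1, size):
--     # Split each size-bit pixel into its high len_m1 bits and the remaining low bits.
--     low = size - len_m1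
--     return [[pixel >> low, pixel & (1 << low) - 1] for pixel in block_decimal]
-- ===== Notes on version B (the rewrite author's own statement) =====
-- stated objective: simpler
-- what changed: B splits each pixel with a shift and a mask (high = pixel >> (size-len_m1), low = pixel & mask) instead of building, zero-padding and slicing a binary string and re-parsing the slices with int(.,2); …
-- outside the precondition, e.g. on block_to_decimal([300], 2, 8): A returns [[2, 44]], B returns [[4, 44]]; on block_to_decimal([5], -2, 4): A returns [[1, 1]], B returns [[0, 5]]; on block_to_decimal([-2], -4, 29): A returns [[0, 2]], B returns [[-1, 8589934590]]
import Mathlib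
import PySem

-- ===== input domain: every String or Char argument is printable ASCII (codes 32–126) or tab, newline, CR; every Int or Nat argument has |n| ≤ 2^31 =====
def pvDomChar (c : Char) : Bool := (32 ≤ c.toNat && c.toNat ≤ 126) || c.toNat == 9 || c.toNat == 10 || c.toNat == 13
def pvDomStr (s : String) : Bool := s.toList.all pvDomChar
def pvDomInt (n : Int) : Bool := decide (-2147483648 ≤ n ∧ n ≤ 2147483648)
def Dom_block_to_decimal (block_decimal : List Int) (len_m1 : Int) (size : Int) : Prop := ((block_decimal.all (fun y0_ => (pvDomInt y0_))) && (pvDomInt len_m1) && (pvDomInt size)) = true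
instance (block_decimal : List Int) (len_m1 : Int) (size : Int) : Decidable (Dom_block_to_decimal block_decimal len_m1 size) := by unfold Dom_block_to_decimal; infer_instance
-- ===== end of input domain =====

-- B splits each size-bit pixel with a shift and a mask instead of A's build/pad/slice/re-parse
-- of a binary string; equal return values on Pre_ (the natural size-bit-pixel domain).

-- ===== PORT A =====
-- hand port of int(s, 2): exact on the strings A ever parses here, which are pure runs of
-- '0'/'1' chars (no sign, whitespace, '_' or '0b' prefix ever reaches int inside Pre_);
-- none = ValueError on the empty slice.
def pvInt2? (cs : List Char) : Option Int :=
  if cs ≠ [] ∧ cs.all (fun c => c == '0' || c == '1') then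
    some (cs.foldl (fun a c => 2 * a + (if c = '1' then 1 else 0)) 0)
  else none

def block_to_decimal (block_decimal : List Int) (len_m1 : Int) (size : Int) : List (List Int) :=
  block_decimal.foldl (fun binaries pixel =>
    -- binary = bin(pixel)[2:]
    let binary := PySem.List.slice (PySem.Int.toBinChars0b pixel) (some 2) none
    let div := size - (binary.length : Int)
    let binary := if 0 < div then List.replicate div.toNat '0' ++ binary else binary
    binaries ++ [[(pvInt2? (PySem.List.slice binary (some 0) (some len_m1))).getD 0,
                  (pvInt2? (PySem.List.slice binary (some len_m1) none)).getD 0]]) []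

-- ===== PORT B =====
def block_to_decimal_alt (block_decimal : List Int) (len_m1 : Int) (size : Int) : List (List Int) :=
  let low := size - len_m1
  block_decimal.map (fun (pixel : Int) =>
    [pixel >>> low.toNat, PySem.Int.band pixel (((1 : Int) <<< low.toNat) - 1)])

-- ===== PRECONDITION & SPEC =====
-- Pre_ restricts to the natural domain (each pixel a size-bit word, the split strictly inside
-- it): it excludes exactly the inputs where A raises ValueError (an empty slice, or int()
-- choking on the 'b' of bin() for a negative pixel) together with the defensible corners where
-- A still returns a value only by accident of string slicing — pixels overflowing size bits
-- (the padding branch never fires, so A's split point drifts with the pixel's width) and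
-- negative or oversized split indices (Python slice wrap-around/clamping).
def Pre_block_to_decimal (block_decimal : List Int) (len_m1 : Int) (size : Int) : Prop :=
  ∀ pixel ∈ block_decimal,
    0 ≤ pixel ∧ pixel < 2 ^ size.toNat ∧ 1 ≤ len_m1 ∧ len_m1 ≤ size - 1
instance (block_decimal : List Int) (len_m1 : Int) (size : Int) : Decidable (Pre_block_to_decimal block_decimal len_m1 size) := by unfold Pre_block_to_decimal; infer_instance

def pvWitness_block_to_decimal : List Int × Int × Int := ([5, 0], 2, 4)

def Spec_block_to_decimal (block_decimal : List Int) (len_m1 : Int) (size : Int) (out : List (List Int)) : Prop := out = block_to_decimal_alt block_decimal len_m1 size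
instance (block_decimal : List Int) (len_m1 : Int) (size : Int) (out : List (List Int)) : Decidable (Spec_block_to_decimal block_decimal len_m1 size out) := by unfold Spec_block_to_decimal; infer_instance

-- ===== CLAIM (what is proved, stated in full; the proofs are below) =====
def Claim_equal_block_to_decimal : Prop := ∀ (block_decimal : List Int) (len_m1 : Int) (size : Int), Dom_block_to_decimal block_decimal len_m1 size → Pre_block_to_decimal block_decimal len_m1 size → Spec_block_to_decimal block_decimal len_m1 size (block_to_decimal block_decimal len_m1 size)

-- ===== LEMMAS AND PROOFS =====

-- value of a binary-digit string, as A's foldl computes it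
def pvVal (cs : List Char) : Int := cs.foldl (fun a c => 2 * a + (if c = '1' then 1 else 0)) 0

lemma pvVal_from (cs : List Char) : ∀ a : Int,
    cs.foldl (fun a c => 2 * a + (if c = '1' then 1 else 0)) a = a * 2 ^ cs.length + pvVal cs := by
  induction cs with
  | nil => intro a; simp [pvVal]
  | cons c cs ih =>
    intro a
    have h1 : pvVal (c :: cs) = (2 * 0 + (if c = '1' then 1 else 0)) * 2 ^ cs.length + pvVal cs :=
      ih _
    rw [List.foldl_cons, ih, h1, List.length_cons]
    ring

lemma pvVal_cons (c : Char) (cs : List Char) :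
    pvVal (c :: cs) = (if c = '1' then 1 else 0) * 2 ^ cs.length + pvVal cs := by
  have h1 : pvVal (c :: cs) = (2 * 0 + (if c = '1' then 1 else 0)) * 2 ^ cs.length + pvVal cs :=
    pvVal_from cs _
  rw [h1]; ring

lemma pvVal_append (xs ys : List Char) :
    pvVal (xs ++ ys) = pvVal xs * 2 ^ ys.length + pvVal ys := by
  have h : pvVal (xs ++ ys) = ys.foldl (fun a c => 2 * a + (if c = '1' then 1 else 0)) (pvVal xs) := by
    simp [pvVal, List.foldl_append]
  rw [h, pvVal_from]

lemma pvVal_bounds (cs : List Char) (h : ∀ c ∈ cs, c = '0' ∨ c = '1') :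
    0 ≤ pvVal cs ∧ pvVal cs < 2 ^ cs.length := by
  induction cs with
  | nil => simp [pvVal]
  | cons c cs ih =>
    have hb := ih (fun x hx => h x (List.mem_cons_of_mem _ hx))
    rw [pvVal_cons, List.length_cons, pow_succ]
    have h0 : (0:Int) ≤ (if c = '1' then 1 else 0) := by split <;> norm_num
    have h2 : ((if c = '1' then (1:Int) else 0)) ≤ 1 := by split <;> norm_num
    have hp : (0:Int) < 2 ^ cs.length := pow_pos (by norm_num) _
    constructor
    · nlinarith [hb.1]
    · nlinarith [hb.2]

lemma pvVal_replicate_zero (k : Nat) : pvVal (List.replicate k '0') = 0 := by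
  induction k with
  | zero => rfl
  | succ k ih =>
    rw [List.replicate_succ, pvVal_cons, ih]
    simp

lemma toDigits_two_digits (n : Nat) : ∀ c ∈ Nat.toDigits 2 n, c = '0' ∨ c = '1' := by
  induction n using Nat.strong_induction_on with
  | _ n ih =>
    by_cases h : n < 2
    · rw [Nat.toDigits_of_lt_base h]
      interval_cases n <;> simp <;> decide
    · rw [Nat.toDigits_of_base_le (by norm_num) (by omega)]
      intro c hc
      rcases List.mem_append.mp hc with h1 | h1
      · exact ih (n / 2) (by omega) c h1
      · have : n % 2 = 0 ∨ n % 2 = 1 := Nat.mod_two_eq_zero_or_one n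
        rcases this with h2 | h2 <;> simp [h2] at h1 <;> simp [h1] <;> decide

lemma pvVal_toDigits (n : Nat) : pvVal (Nat.toDigits 2 n) = (n : Int) := by
  induction n using Nat.strong_induction_on with
  | _ n ih =>
    by_cases h : n < 2
    · rw [Nat.toDigits_of_lt_base h]
      interval_cases n <;> decide
    · rw [Nat.toDigits_of_base_le (by norm_num) (by omega), pvVal_append,
        ih (n / 2) (by omega)]
      have hv : pvVal [Nat.digitChar (n % 2)] = ((n % 2 : Nat) : Int) := by
        rcases Nat.mod_two_eq_zero_or_one n with h2 | h2 <;> rw [h2] <;> decide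
      rw [hv, List.length_singleton]
      push_cast
      omega

lemma length_toDigits_two (n : Nat) :
    (Nat.toDigits 2 n).length = max (PySem.Int.bitLength (n : Int)) 1 := by
  by_cases h0 : n = 0
  · subst h0; simp [Nat.toDigits_zero]
  · have hub : n < 2 ^ PySem.Int.bitLength (n : Int) := by
      simpa using PySem.Int.lt_two_pow_bitLength (n : Int)
    have hbl1 : 1 ≤ PySem.Int.bitLength (n : Int) := by
      by_contra hb
      have hz : PySem.Int.bitLength (n : Int) = 0 := by omega
      rw [hz, pow_zero] at hub
      omega
    have hlb : 2 ^ (PySem.Int.bitLength (n : Int) - 1) ≤ n := by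
      have := PySem.Int.two_pow_bitLength_le (n : Int) (by exact_mod_cast h0)
      simpa using this
    have hle : (Nat.toDigits 2 n).length ≤ PySem.Int.bitLength (n : Int) :=
      (Nat.length_toDigits_le_iff (by norm_num) (by omega)).mpr hub
    have hge : ¬ (Nat.toDigits 2 n).length ≤ PySem.Int.bitLength (n : Int) - 1 := by
      by_cases h1 : PySem.Int.bitLength (n : Int) = 1
      · rw [h1]; have := Nat.length_toDigits_pos (b := 2) (n := n); omega
      · rw [Nat.length_toDigits_le_iff (by norm_num) (by omega)]
        omega
    omega

lemma pvInt2?_eq (cs : List Char) (hne : cs ≠ []) (hd : ∀ c ∈ cs, c = '0' ∨ c = '1') :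
    pvInt2? cs = some (pvVal cs) := by
  unfold pvInt2?
  rw [if_pos]
  · rfl
  · refine ⟨hne, ?_⟩
    rw [List.all_eq_true]
    intro c hc
    rcases hd c hc with h | h <;> simp [h]

lemma split_eq (binary : List Char) (kk : Nat) (pixel : Int)
    (hd : ∀ c ∈ binary, c = '0' ∨ c = '1') (hv : pvVal binary = pixel)
    (h1 : 1 ≤ kk) (h2 : kk + 1 ≤ binary.length) :
    [(pvInt2? (binary.take kk)).getD 0, (pvInt2? (binary.drop kk)).getD 0] =
      [PySem.Int.floordiv pixel ((1 : Int) <<< (binary.length - kk)),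
       PySem.Int.mod pixel ((1 : Int) <<< (binary.length - kk))] := by
  have hlen_take : (binary.take kk).length = kk := by
    rw [List.length_take]; omega
  have hlen_drop : (binary.drop kk).length = binary.length - kk := by
    rw [List.length_drop]
  have hne_take : binary.take kk ≠ [] := by
    intro h; rw [h] at hlen_take; simp at hlen_take; omega
  have hne_drop : binary.drop kk ≠ [] := by
    intro h; rw [h] at hlen_drop; simp at hlen_drop; omega
  have hd_take : ∀ c ∈ binary.take kk, c = '0' ∨ c = '1' :=
    fun c hc => hd c (List.mem_of_mem_take hc)
  have hd_drop : ∀ c ∈ binary.drop kk, c = '0' ∨ c = '1' :=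
    fun c hc => hd c (List.mem_of_mem_drop hc)
  rw [pvInt2?_eq _ hne_take hd_take, pvInt2?_eq _ hne_drop hd_drop]
  set m := binary.length - kk with hm
  have hsplit : pixel = pvVal (binary.take kk) * 2 ^ m + pvVal (binary.drop kk) := by
    rw [← hv]
    conv_lhs => rw [← List.take_append_drop kk binary]
    rw [pvVal_append, hlen_drop]
  have hb := pvVal_bounds _ hd_drop
  rw [hlen_drop] at hb
  have hpow : (1 : Int) <<< m = 2 ^ m := by simp [Int.shiftLeft_eq]
  have hpos : (0 : Int) < 2 ^ m := pow_pos (by norm_num) _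
  have hfd : PySem.Int.floordiv pixel ((1 : Int) <<< m) = pvVal (binary.take kk) := by
    rw [hpow, PySem.Int.floordiv_eq_iff_of_pos hpos]
    constructor
    · nlinarith [hb.1]
    · nlinarith [hb.2]
  have hmod : PySem.Int.mod pixel ((1 : Int) <<< m) = pvVal (binary.drop kk) := by
    have := PySem.Int.floordiv_mul_add_mod pixel ((1 : Int) <<< m)
    rw [hfd] at this
    rw [hpow] at this ⊢
    nlinarith [this]
  rw [hfd, hmod]
  rfl

lemma foldl_append_map {α β : Type} (f : α → β) (xs : List α) : ∀ acc : List β,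
    xs.foldl (fun acc x => acc ++ [f x]) acc = acc ++ xs.map f := by
  induction xs with
  | nil => intro acc; simp
  | cons x xs ih =>
    intro acc
    simp only [List.foldl_cons, List.map_cons, ih, List.append_assoc, List.singleton_append]

-- bridge: shift/mask arithmetic on a nonnegative int versus floor division and remainder
lemma nat_and_mod (n m : Nat) : n &&& (2 ^ m - 1) = n % 2 ^ m := by
  apply Nat.eq_of_testBit_eq
  intro i
  simp [Nat.testBit_mod_two_pow]

lemma shiftr_eq_floordiv (p : Int) (m : Nat) (hp : 0 ≤ p) :
    p >>> m = PySem.Int.floordiv p ((1 : Int) <<< m) := by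
  obtain ⟨n, rfl⟩ := Int.eq_ofNat_of_zero_le hp
  have h1 : ((1 : Int) <<< m) = ((2 ^ m : Nat) : Int) := by
    simp [Int.shiftLeft_eq]
  have h2 : ((n : Int) >>> m) = ((n >>> m : Nat) : Int) := rfl
  rw [h1, h2, PySem.Int.floordiv_natCast, Nat.shiftRight_eq_div_pow]

lemma band_eq_mod (p : Int) (m : Nat) (hp : 0 ≤ p) :
    PySem.Int.band p ((1 : Int) <<< m - 1) = PySem.Int.mod p ((1 : Int) <<< m) := by
  obtain ⟨n, rfl⟩ := Int.eq_ofNat_of_zero_le hp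
  have h1 : ((1 : Int) <<< m) = ((2 ^ m : Nat) : Int) := by
    simp [Int.shiftLeft_eq]
  have h2 : ((1 : Int) <<< m - 1) = ((2 ^ m - 1 : Nat) : Int) := by
    rw [h1]
    have : 1 ≤ 2 ^ m := Nat.one_le_two_pow
    push_cast [this]
    ring
  rw [h2, h1, PySem.Int.band_natCast, PySem.Int.mod_natCast, nat_and_mod]

-- the per-pixel equality on the natural domain
lemma pixel_eq (pixel len_m1 size : Int) (hp : 0 ≤ pixel) (hlt : pixel < 2 ^ size.toNat)
    (h1 : 1 ≤ len_m1) (h2 : len_m1 ≤ size - 1) :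
    (let binary := PySem.List.slice (PySem.Int.toBinChars0b pixel) (some 2) none
     let div := size - (binary.length : Int)
     let binary := if 0 < div then List.replicate div.toNat '0' ++ binary else binary
     [(pvInt2? (PySem.List.slice binary (some 0) (some len_m1))).getD 0,
      (pvInt2? (PySem.List.slice binary (some len_m1) none)).getD 0]) =
    [pixel >>> (size - len_m1).toNat,
     PySem.Int.band pixel (((1 : Int) <<< (size - len_m1).toNat) - 1)] := by
  have hneg : ¬ pixel < 0 := by omega
  have hpx : ((pixel.toNat : Int)) = pixel := Int.toNat_of_nonneg hp
  set n := pixel.toNat with hn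
  have hbin0 : PySem.List.slice (PySem.Int.toBinChars0b pixel) (some 2) none = Nat.toDigits 2 n := by
    rw [PySem.List.slice_from _ (by norm_num : (0:Int) ≤ 2)]
    simp [PySem.Int.toBinChars0b, hneg]
    rfl
  dsimp only
  rw [hbin0]
  set ds := Nat.toDigits 2 n with hds
  set dl := ds.length with hdl
  have hdl1 : 1 ≤ dl := Nat.length_toDigits_pos
  have hblen : dl = max (PySem.Int.bitLength pixel) 1 := by
    rw [hdl, hds, ← hpx]
    exact length_toDigits_two n
  -- the pixel fits in size bits, so the padded string has length exactly size
  have hbl_le : PySem.Int.bitLength pixel ≤ size.toNat := by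
    by_cases h0 : pixel = 0
    · simp [h0]
    · have hlow := PySem.Int.two_pow_bitLength_le pixel h0
      have hna : pixel.natAbs < 2 ^ size.toNat := by
        have : pixel.natAbs = n := by omega
        rw [this]
        exact_mod_cast (hpx ▸ hlt)
      by_contra hb
      have hmono : 2 ^ size.toNat ≤ 2 ^ (PySem.Int.bitLength pixel - 1) :=
        Nat.pow_le_pow_right (by norm_num) (by omega)
      omega
  set binary := if 0 < size - (dl : Int) then List.replicate (size - (dl : Int)).toNat '0' ++ ds else ds with hbinary
  have hdl_le : dl ≤ size.toNat := by omega
  have hsz1 : 2 ≤ size := by omega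
  have hlen : binary.length = size.toNat := by
    rw [hbinary]
    split_ifs with h
    · rw [List.length_append, List.length_replicate]; omega
    · omega
  have hdig : ∀ c ∈ binary, c = '0' ∨ c = '1' := by
    rw [hbinary]
    split_ifs with h
    · intro c hc
      rcases List.mem_append.mp hc with h' | h'
      · left; exact List.eq_of_mem_replicate h'
      · exact toDigits_two_digits n c h'
    · exact toDigits_two_digits n
  have hval : pvVal binary = pixel := by
    rw [hbinary]
    split_ifs with h
    · rw [pvVal_append, pvVal_replicate_zero, pvVal_toDigits, hpx]; ring
    · rw [hds, pvVal_toDigits, hpx]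
  set kk := len_m1.toNat with hkk
  have hl : 0 ≤ len_m1 := by omega
  have hsl_hi : PySem.List.slice binary (some 0) (some len_m1) = binary.take kk := by
    rw [PySem.List.slice_zero_start, PySem.List.slice_to _ hl]
  have hsl_lo : PySem.List.slice binary (some len_m1) none = binary.drop kk := by
    rw [PySem.List.slice_from _ hl]
  rw [hsl_hi, hsl_lo]
  have hshift : (size - len_m1).toNat = binary.length - kk := by
    rw [hlen]; omega
  rw [hshift, shiftr_eq_floordiv pixel _ hp, band_eq_mod pixel _ hp]
  exact split_eq binary kk pixel hdig hval (by omega) (by rw [hlen]; omega)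

-- ===== VERDICT (by name: the statement is the Claim_ definition above) =====
theorem block_to_decimal_spec : Claim_equal_block_to_decimal := by
  intro bd len_m1 size _ hpre
  unfold Spec_block_to_decimal block_to_decimal block_to_decimal_alt
  rw [foldl_append_map]
  rw [List.nil_append]
  refine List.map_congr_left ?_
  intro pixel hmem
  obtain ⟨hp, hlt, h1, h2⟩ := hpre pixel hmem
  exact pixel_eq pixel len_m1 size hp hlt h1 h2
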